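-- pv_equiv track=rewrite | github.com/RisPNG/pycro-station | pycros/PDF--to--Excel--LightOnOCR-2/main.py | _extract_html_tables
-- ===== SOURCE A (Python) =====
-- from typing import Callable, List, Tuple, TYPE_CHECKING
--
-- def _extract_html_tables(text: str) -> Tuple[str, List[str]]:
--     """
--     Extract <table>...</table> blocks from OCR text.
--
--     Returns (text_without_tables, tables_html).
--     Works even if the last table is truncated (missing </table>).
--     """
--     tables: List[str] = []
--     kept_lines: List[str] = []
--
--     in_table = False
--     buf: List[str] = []
--
--     for raw in (text or "").splitlines():
--         line = raw.rstrip("\n")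
--         lower = line.lower()
--
--         if not in_table and "<table" in lower:
--             in_table = True
--             buf = [line]
--             if "</table>" in lower:
--                 in_table = False
--                 tables.append("\n".join(buf))
--                 buf = []
--             continue
--
--         if in_table:
--             buf.append(line)
--             if "</table>" in lower:
--                 in_table = False
--                 tables.append("\n".join(buf))
--                 buf = []
--             continue
--
--         kept_lines.append(line)
--
--     if in_table and buf:
--         tables.append("\n".join(buf))
--
--     return "\n".join(kept_lines), tables
-- ===== SOURCE B (Python) =====
-- from typing import List, Tuple
--
-- def _find_tag(lows: List[str], i: int, tag: str) -> int:
--     """First index j >= i whose (lowercased) line contains tag, or -1."""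
--     for j in range(i, len(lows)):
--         if tag in lows[j]:
--             return j
--     return -1
--
-- def _extract_html_tables(text: str) -> Tuple[str, List[str]]:
--     """
--     Extract <table>...</table> blocks from OCR text.
--
--     Returns (text_without_tables, tables_html).
--     Works even if the last table is truncated (missing </table>).
--
--     Strategy: first compute the list of (start, end) line-index intervals of the
--     table blocks by jumping from tag to tag, then build both outputs from those
--     intervals by slicing / filtering.
--     """
--     lines = (text or "").splitlines()
--     lows = [l.lower() for l in lines]
--     n = len(lines)
--
--     spans: List[Tuple[int, int]] = []
--     i = 0
--     while i < n:
--         s = _find_tag(lows, i, "<table")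
--         if s < 0:
--             break
--         t = _find_tag(lows, s, "</table>")
--         if t < 0:
--             t = n - 1
--         spans.append((s, t))
--         i = t + 1
--
--     tables = ["\n".join(lines[s:t + 1]) for s, t in spans]
--     kept = "\n".join(l for j, l in enumerate(lines)
--                      if not any(s <= j <= t for s, t in spans))
--     return kept, tables
-- ===== Notes on version B (the rewrite author's own statement) =====
-- stated objective: alternative
-- what changed: Replaced A's streaming in_table-flag state machine with a staged, interval-based algorithm: B first computes the list of (start, end) line-index spans of the table blocks by jumping from tag to tag, then builds the tables by slicing those spans and the kept text by filtering out enumerated lines covered by a span.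
import Mathlib
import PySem

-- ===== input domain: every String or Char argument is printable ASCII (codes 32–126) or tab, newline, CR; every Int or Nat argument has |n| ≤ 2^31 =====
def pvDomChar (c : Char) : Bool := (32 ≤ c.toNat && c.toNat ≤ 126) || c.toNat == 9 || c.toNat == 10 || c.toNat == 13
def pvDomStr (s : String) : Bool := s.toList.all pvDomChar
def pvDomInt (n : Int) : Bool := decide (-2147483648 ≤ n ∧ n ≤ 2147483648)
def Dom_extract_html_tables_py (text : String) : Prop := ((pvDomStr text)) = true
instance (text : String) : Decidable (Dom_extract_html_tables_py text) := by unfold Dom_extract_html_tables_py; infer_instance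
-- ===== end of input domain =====

-- B replaces A's streaming in_table state machine by a staged, interval-based
-- algorithm: it first computes the (start, end) line-index spans of the table
-- blocks by jumping from tag to tag, then builds both outputs from those spans
-- by slicing and filtering; same output, same linear cost.

-- ===== PORT A =====

-- raw.rstrip("\n"): PySem has no rstrip-with-chars, ported by hand (exact: drops
-- trailing '\n' characters only).
def pvRstripNl (s : String) : String :=
  String.ofList ((s.toList.reverse.dropWhile (· == '\n')).reverse)

-- the for-loop of A, as structural recursion over the same state
-- (lines, tables, kept_lines, in_table, buf); the base case is the code after the loop.
def pvALoop : List String → List String → List String → Bool → List String →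
    (String × List String)
  | [], tables, kept, in_table, buf =>
    let tables := if in_table && !buf.isEmpty then tables ++ [PySem.Str.join "\n" buf] else tables
    (PySem.Str.join "\n" kept, tables)
  | raw :: rest, tables, kept, in_table, buf =>
    let line := pvRstripNl raw
    let lower := PySem.Str.lower line
    if !in_table && PySem.Str.isIn "<table" lower then
      let buf := [line]
      if PySem.Str.isIn "</table>" lower then
        pvALoop rest (tables ++ [PySem.Str.join "\n" buf]) kept false []
      else
        pvALoop rest tables kept true buf
    else if in_table then
      let buf := buf ++ [line]
      if PySem.Str.isIn "</table>" lower then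
        pvALoop rest (tables ++ [PySem.Str.join "\n" buf]) kept false []
      else
        pvALoop rest tables kept true buf
    else
      pvALoop rest tables (kept ++ [line]) in_table buf

def extract_html_tables_py (text : String) : String × List String :=
  pvALoop (PySem.Str.splitlines (if text == "" then "" else text)) [] [] false []

-- ===== PORT B =====

-- _find_tag: first index j ≥ i whose line contains tag.  Python returns -1 for
-- "absent" and the caller tests "< 0"; ported as Option Nat (none = -1), exact.
def pvFindTag (lows : List String) (tag : String) (i : Nat) : Option Nat :=
  if h : i < lows.length then
    if PySem.Str.isIn tag lows[i] then some i
    else pvFindTag lows tag (i + 1)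
  else none
  termination_by lows.length - i

-- (termination fact for pvSpans, cited in its decreasing_by)
theorem pvFindTag_ge (lows : List String) (tag : String) (i : Nat) {s : Nat}
    (h : pvFindTag lows tag i = some s) : i ≤ s := by
  induction i using pvFindTag.induct lows tag with
  | case1 i hi hhit =>
    rw [pvFindTag, dif_pos hi, if_pos hhit] at h
    simp only [Option.some.injEq] at h
    omega
  | case2 i hi hhit ih =>
    rw [pvFindTag, dif_pos hi, if_neg hhit] at h
    exact Nat.le_of_succ_le (ih h)
  | case3 i hi =>
    rw [pvFindTag, dif_neg hi] at h
    exact absurd h (by simp)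

-- B's while loop computing the list of table spans (start, end) by jumping
-- from tag to tag.
def pvSpans (lows : List String) (n : Nat) (i : Nat) : List (Nat × Nat) :=
  if _hi : i < n then
    match hs : pvFindTag lows "<table" i with
    | none => []
    | some s =>
      let t : Nat :=
        match pvFindTag lows "</table>" s with
        | none => n - 1
        | some t' => t'
      (s, t) :: pvSpans lows n (t + 1)
  else []
  termination_by n - i
  decreasing_by
    have h1 : i ≤ s := pvFindTag_ge lows "<table" i hs
    cases ht : pvFindTag lows "</table>" s with
    | none => dsimp only; omega
    | some t' =>
      have h2 : s ≤ t' := pvFindTag_ge lows "</table>" s ht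
      dsimp only; omega

def extract_html_tables_py_alt (text : String) : String × List String :=
  let lines := PySem.Str.splitlines (if text == "" then "" else text)
  let lows := lines.map PySem.Str.lower
  let n := lines.length
  let spans := pvSpans lows n 0
  let tables := spans.map (fun p =>
    PySem.Str.join "\n" (PySem.List.slice lines (some (p.1 : Int)) (some ((p.2 : Int) + 1))))
  let kept := PySem.Str.join "\n"
    (((PySem.List.enumerate lines).filter
        (fun q => !(spans.any (fun p => decide ((p.1 : Int) ≤ q.1 ∧ q.1 ≤ (p.2 : Int)))))).map (·.2))
  (kept, tables)

-- ===== PRECONDITION & SPEC =====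
def Spec_extract_html_tables_py (text : String) (out : String × List String) : Prop := out = extract_html_tables_py_alt text
instance (text : String) (out : String × List String) : Decidable (Spec_extract_html_tables_py text out) := by unfold Spec_extract_html_tables_py; infer_instance

-- ===== CLAIM (what is proved, stated in full; the proofs are below) =====
def Claim_equal_extract_html_tables_py : Prop := ∀ (text : String), Dom_extract_html_tables_py text → Spec_extract_html_tables_py text (extract_html_tables_py text)

-- ===== LEMMAS AND PROOFS =====

-- ---- facts about pvFindTag ----

theorem pvFindTag_lt (lows : List String) (tag : String) (i : Nat) {s : Nat}
    (h : pvFindTag lows tag i = some s) : s < lows.length := by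
  induction i using pvFindTag.induct lows tag with
  | case1 i hi hhit =>
    rw [pvFindTag, dif_pos hi, if_pos hhit] at h
    simp only [Option.some.injEq] at h
    omega
  | case2 i hi hhit ih =>
    rw [pvFindTag, dif_pos hi, if_neg hhit] at h
    exact ih h
  | case3 i hi =>
    rw [pvFindTag, dif_neg hi] at h
    exact absurd h (by simp)

theorem pvFindTag_hit (lows : List String) (tag : String) (i : Nat) {s : Nat}
    (h : pvFindTag lows tag i = some s) (hs : s < lows.length) :
    PySem.Str.isIn tag lows[s] = true := by
  induction i using pvFindTag.induct lows tag with
  | case1 i hi hhit =>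
    rw [pvFindTag, dif_pos hi, if_pos hhit] at h
    simp only [Option.some.injEq] at h
    subst h; exact hhit
  | case2 i hi hhit ih =>
    rw [pvFindTag, dif_pos hi, if_neg hhit] at h
    exact ih h
  | case3 i hi =>
    rw [pvFindTag, dif_neg hi] at h
    exact absurd h (by simp)

theorem pvFindTag_min (lows : List String) (tag : String) (i : Nat) {s : Nat}
    (h : pvFindTag lows tag i = some s) :
    ∀ j, i ≤ j → j < s → ∀ (hj : j < lows.length), PySem.Str.isIn tag lows[j] = false := by
  induction i using pvFindTag.induct lows tag with
  | case1 i hi hhit =>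
    rw [pvFindTag, dif_pos hi, if_pos hhit] at h
    simp only [Option.some.injEq] at h
    subst h
    intro j h1 h2
    omega
  | case2 i hi hhit ih =>
    rw [pvFindTag, dif_pos hi, if_neg hhit] at h
    intro j h1 h2 hj
    rcases Nat.eq_or_lt_of_le h1 with rfl | h1'
    · exact Bool.eq_false_iff.mpr hhit
    · exact ih h j h1' h2 hj
  | case3 i hi =>
    rw [pvFindTag, dif_neg hi] at h
    exact absurd h (by simp)

theorem pvFindTag_none (lows : List String) (tag : String) (i : Nat)
    (h : pvFindTag lows tag i = none) :
    ∀ j, i ≤ j → ∀ (hj : j < lows.length), PySem.Str.isIn tag lows[j] = false := by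
  induction i using pvFindTag.induct lows tag with
  | case1 i hi hhit =>
    rw [pvFindTag, dif_pos hi, if_pos hhit] at h
    exact absurd h (by simp)
  | case2 i hi hhit ih =>
    rw [pvFindTag, dif_pos hi, if_neg hhit] at h
    intro j h1 hj
    rcases Nat.eq_or_lt_of_le h1 with rfl | h1'
    · exact Bool.eq_false_iff.mpr hhit
    · exact ih h j h1' hj
  | case3 i hi =>
    intro j h1 hj
    omega

-- ---- splitlines produces newline-free lines (so A's rstrip is the identity) ----

-- one unfolding step of splitlines.go on a cons that is not the "\r\n" pattern
theorem pv_go_cons (isB : Char → Bool) (c : Char) (rest cur : List Char) (acc : List (List Char))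
    (hne : ∀ (rest_1 : List Char), c = '\x0d' → rest = '\n' :: rest_1 → False) :
    PySem.Chars.splitlines.go isB (c :: rest) cur acc =
      if isB c = true then PySem.Chars.splitlines.go isB rest [] (cur.reverse :: acc)
      else PySem.Chars.splitlines.go isB rest (c :: cur) acc := by
  rw [PySem.Chars.splitlines.go.eq_def]
  split
  · rename_i heq; simp at heq
  · rename_i rest2 heq
    injection heq with h1 h2
    exact (hne rest2 h1 h2).elim
  · rename_i hne2 heq
    injection heq with h1 h2
    subst h1; subst h2; rfl

-- every line splitlines.go produces consists of non-break characters
theorem pv_splitlines_go_no_break (isB : Char → Bool) (s cur : List Char)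
    (acc : List (List Char))
    (hcur : ∀ c ∈ cur, isB c = false)
    (hacc : ∀ l ∈ acc, ∀ c ∈ l, isB c = false) :
    ∀ l ∈ PySem.Chars.splitlines.go isB s cur acc, ∀ c ∈ l, isB c = false := by
  induction s, cur, acc using PySem.Chars.splitlines.go.induct (isB := isB) with
  | case1 cur acc hemp =>
    simp only [PySem.Chars.splitlines.go, hemp, if_pos]
    intro l hl; exact hacc l (List.mem_reverse.mp hl)
  | case2 cur acc hemp =>
    simp only [PySem.Chars.splitlines.go, hemp, Bool.false_eq_true, if_false]
    intro l hl c hc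
    rcases List.mem_cons.mp (List.mem_reverse.mp hl) with h | h
    · exact hcur c (List.mem_reverse.mp (h ▸ hc))
    · exact hacc l h c hc
  | case3 rest cur acc ih =>
    simp only [PySem.Chars.splitlines.go]
    refine ih (by simp) ?_
    intro l hl c hc
    rcases List.mem_cons.mp hl with h | h
    · exact hcur c (List.mem_reverse.mp (h ▸ hc))
    · exact hacc l h c hc
  | case4 c rest cur acc hne hb ih =>
    rw [pv_go_cons isB c rest cur acc hne, if_pos hb]
    refine ih (by simp) ?_
    intro l hl c' hc'
    rcases List.mem_cons.mp hl with h | h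
    · exact hcur c' (List.mem_reverse.mp (h ▸ hc'))
    · exact hacc l h c' hc'
  | case5 c rest cur acc hne hb ih =>
    rw [pv_go_cons isB c rest cur acc hne, if_neg hb]
    refine ih ?_ hacc
    intro c' hc'
    rcases List.mem_cons.mp hc' with h | h
    · exact h ▸ Bool.eq_false_iff.mpr hb
    · exact hcur c' h

theorem pv_splitlines_no_nl (t : String) :
    ∀ l ∈ PySem.Str.splitlines t, '\n' ∉ l.toList := by
  intro l hl hmem
  have h1 : l.toList ∈ PySem.Chars.splitlines t.toList := by
    rw [← PySem.Str.splitlines_map_toList]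
    exact List.mem_map_of_mem hl
  have h2 := pv_splitlines_go_no_break
    (fun c =>
      decide (c.toNat = 10) || decide (c.toNat = 13) || decide (c.toNat = 11) ||
        decide (c.toNat = 12) || decide (c.toNat = 28) || decide (c.toNat = 29) ||
        decide (c.toNat = 30) || decide (c.toNat = 133) || decide (c.toNat = 8232) ||
        decide (c.toNat = 8233))
    t.toList [] [] (by simp) (by simp) l.toList h1 '\n' hmem
  simp at h2

theorem pvRstripNl_of_no_nl (s : String) (h : '\n' ∉ s.toList) : pvRstripNl s = s := by
  unfold pvRstripNl
  have hd : s.toList.reverse.dropWhile (· == '\n') = s.toList.reverse := by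
    cases hr : s.toList.reverse with
    | nil => simp
    | cons a t =>
      have ha : a ∈ s.toList := by
        rw [← List.mem_reverse, hr]; exact List.mem_cons_self
      have : ¬ a = '\n' := fun hh => h (hh ▸ ha)
      simp [this]
  rw [hd]
  simp

-- ---- enumerate indexing ----

theorem pv_enum_getElem? {α : Type} (xs : List α) (st : Int) (k : Nat) (hk : k < xs.length) :
    (PySem.List.enumerate xs st)[k]? = some (st + (k : Int), xs[k]) := by
  induction xs generalizing st k with
  | nil => simp at hk
  | cons x xs ih =>
    rw [PySem.List.enumerate_cons]
    cases k with
    | zero => simp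
    | succ m =>
      have hm : m < xs.length := by simpa using hk
      have hc : st + ((m + 1 : Nat) : Int) = (st + 1) + (m : Int) := by push_cast; ring
      simp only [List.getElem?_cons_succ, List.getElem_cons_succ, ih (st + 1) m hm, hc]

theorem pv_enum_mem_drop {α : Type} (xs : List α) (a : Nat) (q : Int × α)
    (hq : q ∈ (PySem.List.enumerate xs).drop a) :
    ∃ k : Nat, ∃ hk : k < xs.length, a ≤ k ∧ q = ((k : Int), xs[k]) := by
  obtain ⟨j, hj, hqe⟩ := List.mem_iff_getElem.mp hq
  have hlen : (PySem.List.enumerate xs).length = xs.length := PySem.List.length_enumerate xs 0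
  have hj' : a + j < xs.length := by
    have := hj; rw [List.length_drop, hlen] at this; omega
  refine ⟨a + j, hj', by omega, ?_⟩
  rw [List.getElem_drop] at hqe
  have := (List.getElem_eq_iff (by omega)).mpr (pv_enum_getElem? xs 0 (a + j) hj')
  rw [this] at hqe
  rw [← hqe]
  simp

theorem pv_enum_mem_take_drop {α : Type} (xs : List α) (a b : Nat) (q : Int × α)
    (hq : q ∈ ((PySem.List.enumerate xs).drop a).take b) :
    ∃ k : Nat, ∃ hk : k < xs.length, a ≤ k ∧ k < a + b ∧ q = ((k : Int), xs[k]) := by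
  obtain ⟨j, hj, hqe⟩ := List.mem_iff_getElem.mp hq
  have hlen : (PySem.List.enumerate xs).length = xs.length := PySem.List.length_enumerate xs 0
  have hjb : j < b := by
    have := hj; rw [List.length_take] at this; omega
  have hj' : a + j < xs.length := by
    have := hj; rw [List.length_take, List.length_drop, hlen] at this; omega
  refine ⟨a + j, hj', by omega, by omega, ?_⟩
  rw [List.getElem_take, List.getElem_drop] at hqe
  have := (List.getElem_eq_iff (by omega)).mpr (pv_enum_getElem? xs 0 (a + j) hj')
  rw [this] at hqe
  rw [← hqe]
  simp

-- elements of a take/drop window of a list, by absolute index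
theorem pv_mem_take_drop {α : Type} (xs : List α) (a b : Nat) (l : α)
    (hl : l ∈ (xs.drop a).take b) :
    ∃ k : Nat, ∃ hk : k < xs.length, a ≤ k ∧ k < a + b ∧ l = xs[k] := by
  obtain ⟨j, hj, hle⟩ := List.mem_iff_getElem.mp hl
  have hjb : j < b := by
    have := hj; rw [List.length_take] at this; omega
  have hj' : a + j < xs.length := by
    have := hj; rw [List.length_take, List.length_drop] at this; omega
  refine ⟨a + j, hj', by omega, by omega, ?_⟩
  rw [List.getElem_take, List.getElem_drop] at hle
  exact hle.symm

-- ---- the three phases of A's loop ----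

-- lines outside tables are appended to kept_lines
theorem pvS1 (pre : List String)
    (hp : ∀ l ∈ pre, '\n' ∉ l.toList ∧ PySem.Str.isIn "<table" (PySem.Str.lower l) = false) :
    ∀ rest tables kept,
      pvALoop (pre ++ rest) tables kept false [] = pvALoop rest tables (kept ++ pre) false [] := by
  induction pre with
  | nil => intro rest tables kept; simp
  | cons l pre ih =>
    intro rest tables kept
    obtain ⟨hnl, hns⟩ := hp l List.mem_cons_self
    have hr : pvRstripNl l = l := pvRstripNl_of_no_nl l hnl
    simp only [List.cons_append, pvALoop, hr, hns, Bool.not_false, Bool.true_and,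
      Bool.false_eq_true, if_false]
    rw [ih (fun x hx => hp x (List.mem_cons_of_mem _ hx)) rest tables (kept ++ [l])]
    simp

-- inside a table, lines are buffered up to (and including) the closing line
theorem pvS2 (mid : List String)
    (hm : ∀ l ∈ mid, '\n' ∉ l.toList ∧ PySem.Str.isIn "</table>" (PySem.Str.lower l) = false)
    (lt : String) (hlt : '\n' ∉ lt.toList)
    (hend : PySem.Str.isIn "</table>" (PySem.Str.lower lt) = true) :
    ∀ rest tables kept buf,
      pvALoop (mid ++ lt :: rest) tables kept true buf =
        pvALoop rest (tables ++ [PySem.Str.join "\n" (buf ++ mid ++ [lt])]) kept false [] := by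
  induction mid with
  | nil =>
    intro rest tables kept buf
    have hr : pvRstripNl lt = lt := pvRstripNl_of_no_nl lt hlt
    simp only [List.nil_append, pvALoop, hr, hend, Bool.not_true, Bool.false_and,
      Bool.false_eq_true, if_false, if_true, List.append_nil]
  | cons l mid ih =>
    intro rest tables kept buf
    obtain ⟨hnl, hne⟩ := hm l List.mem_cons_self
    have hr : pvRstripNl l = l := pvRstripNl_of_no_nl l hnl
    simp only [List.cons_append, pvALoop, hr, hne, Bool.not_true, Bool.false_and,
      Bool.false_eq_true, if_false, if_true]
    rw [ih (fun x hx => hm x (List.mem_cons_of_mem _ hx)) rest tables kept (buf ++ [l])]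
    simp

-- a truncated table: the loop ends in table mode and the buffer is flushed
theorem pvS3 (mid : List String)
    (hm : ∀ l ∈ mid, '\n' ∉ l.toList ∧ PySem.Str.isIn "</table>" (PySem.Str.lower l) = false) :
    ∀ tables kept buf, buf ≠ [] →
      pvALoop mid tables kept true buf =
        (PySem.Str.join "\n" kept, tables ++ [PySem.Str.join "\n" (buf ++ mid)]) := by
  induction mid with
  | nil =>
    intro tables kept buf hbuf
    simp [pvALoop, List.isEmpty_eq_false_iff.mpr hbuf]
  | cons l mid ih =>
    intro tables kept buf hbuf
    obtain ⟨hnl, hne⟩ := hm l List.mem_cons_self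
    have hr : pvRstripNl l = l := pvRstripNl_of_no_nl l hnl
    simp only [pvALoop, hr, hne, Bool.not_true, Bool.false_and, Bool.false_eq_true,
      if_false, if_true]
    rw [ih (fun x hx => hm x (List.mem_cons_of_mem _ hx)) tables kept (buf ++ [l]) (by simp)]
    simp

-- ---- unfolding equations for pvSpans ----

theorem pvSpans_stop (lows : List String) (n i : Nat) (hi : ¬ i < n) :
    pvSpans lows n i = [] := by
  rw [pvSpans, dif_neg hi]

theorem pvSpans_noStart (lows : List String) (n i : Nat) (hi : i < n)
    (hs : pvFindTag lows "<table" i = none) :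
    pvSpans lows n i = [] := by
  rw [pvSpans, dif_pos hi]
  split
  · rfl
  · rename_i s1 heq
    rw [hs] at heq
    cases heq

theorem pvSpans_cons (lows : List String) (n i s t : Nat) (hi : i < n)
    (hs : pvFindTag lows "<table" i = some s)
    (ht : (match pvFindTag lows "</table>" s with | none => n - 1 | some t' => t') = t) :
    pvSpans lows n i = (s, t) :: pvSpans lows n (t + 1) := by
  rw [pvSpans, dif_pos hi]
  split
  · rename_i heq
    rw [hs] at heq
    cases heq
  · rename_i s1 heq
    rw [hs] at heq
    injection heq with h
    subst h
    rw [ht]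

-- ---- bounds of the spans B computes ----

theorem pvSpans_bounds (lows : List String) (n : Nat) (hn : lows.length = n) :
    ∀ m i, n - i ≤ m → ∀ p ∈ pvSpans lows n i, i ≤ p.1 ∧ p.1 ≤ p.2 ∧ p.2 < n := by
  intro m
  induction m with
  | zero =>
    intro i him p hp
    rw [pvSpans_stop lows n i (by omega)] at hp
    simp at hp
  | succ m ihm =>
    intro i him p hp
    by_cases hi : i < n
    · cases hs : pvFindTag lows "<table" i with
      | none =>
        rw [pvSpans_noStart lows n i hi hs] at hp
        simp at hp
      | some s =>
        have h1 : i ≤ s := pvFindTag_ge lows "<table" i hs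
        have h2 : s < n := hn ▸ pvFindTag_lt lows "<table" i hs
        cases ht0 : pvFindTag lows "</table>" s with
        | none =>
          rw [pvSpans_cons lows n i s (n - 1) hi hs (by rw [ht0])] at hp
          rcases List.mem_cons.mp hp with rfl | hp'
          · dsimp only; omega
          · have := ihm (n - 1 + 1) (by omega) p hp'
            omega
        | some t' =>
          have h3 : s ≤ t' := pvFindTag_ge lows "</table>" s ht0
          have h4 : t' < n := hn ▸ pvFindTag_lt lows "</table>" s ht0
          rw [pvSpans_cons lows n i s t' hi hs (by rw [ht0])] at hp
          rcases List.mem_cons.mp hp with rfl | hp'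
          · dsimp only; omega
          · have := ihm (t' + 1) (by omega) p hp'
            omega
    · rw [pvSpans_stop lows n i hi] at hp
      simp at hp

-- ---- generic decomposition helpers ----

theorem pv_mem_drop {α : Type} (xs : List α) (a : Nat) (l : α)
    (hl : l ∈ xs.drop a) :
    ∃ k : Nat, ∃ hk : k < xs.length, a ≤ k ∧ l = xs[k] := by
  obtain ⟨j, hj, hle⟩ := List.mem_iff_getElem.mp hl
  have hj' : a + j < xs.length := by
    have := hj; rw [List.length_drop] at this; omega
  refine ⟨a + j, hj', by omega, ?_⟩
  rw [List.getElem_drop] at hle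
  exact hle.symm

theorem pv_drop_decomp {α : Type} (xs : List α) (i s : Nat) (h1 : i ≤ s) :
    xs.drop i = (xs.drop i).take (s - i) ++ xs.drop s := by
  conv_lhs => rw [← List.take_append_drop (s - i) (xs.drop i)]
  rw [List.drop_drop]
  have : i + (s - i) = s := by omega
  rw [this]

-- ---- the main correspondence between A's loop and B's spans ----

theorem pv_main (ls : List String) (hnl : ∀ l ∈ ls, '\n' ∉ l.toList) :
    ∀ m i tables kept, ls.length - i ≤ m →
      pvALoop (ls.drop i) tables kept false [] =
        (PySem.Str.join "\n" (kept ++ (((PySem.List.enumerate ls).drop i).filter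
            (fun q => !((pvSpans (ls.map PySem.Str.lower) ls.length i).any
               (fun p => decide ((p.1 : Int) ≤ q.1 ∧ q.1 ≤ (p.2 : Int)))))).map (·.2)),
         tables ++ (pvSpans (ls.map PySem.Str.lower) ls.length i).map
            (fun p => PySem.Str.join "\n"
              (PySem.List.slice ls (some (p.1 : Int)) (some ((p.2 : Int) + 1))))) := by
  have hlen : (ls.map PySem.Str.lower).length = ls.length := by simp
  have hElen : (PySem.List.enumerate ls).length = ls.length := PySem.List.length_enumerate ls 0
  -- the terminated / exhausted case, used twice
  have base : ∀ i tables kept, ls.length ≤ i →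
      pvALoop (ls.drop i) tables kept false [] =
        (PySem.Str.join "\n" (kept ++ (((PySem.List.enumerate ls).drop i).filter
            (fun q => !((pvSpans (ls.map PySem.Str.lower) ls.length i).any
               (fun p => decide ((p.1 : Int) ≤ q.1 ∧ q.1 ≤ (p.2 : Int)))))).map (·.2)),
         tables ++ (pvSpans (ls.map PySem.Str.lower) ls.length i).map
            (fun p => PySem.Str.join "\n"
              (PySem.List.slice ls (some (p.1 : Int)) (some ((p.2 : Int) + 1))))) := by
    intro i tables kept hni
    rw [List.drop_eq_nil_of_le hni, List.drop_eq_nil_of_le (by omega),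
      pvSpans_stop _ _ _ (by omega)]
    simp [pvALoop]
  intro m
  induction m with
  | zero =>
    intro i tables kept him
    exact base i tables kept (by omega)
  | succ m ihm =>
    intro i tables kept him
    by_cases hi : i < ls.length
    · cases hs : pvFindTag (ls.map PySem.Str.lower) "<table" i with
      | none =>
        rw [pvSpans_noStart _ _ _ hi hs]
        have hpre : ∀ l ∈ ls.drop i, '\n' ∉ l.toList ∧
            PySem.Str.isIn "<table" (PySem.Str.lower l) = false := by
          intro l hl
          obtain ⟨k, hk, hik, rfl⟩ := pv_mem_drop ls i l hl
          refine ⟨hnl _ (List.getElem_mem hk), ?_⟩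
          have := pvFindTag_none _ "<table" i hs k hik (by omega)
          rwa [List.getElem_map] at this
        have h0 := pvS1 (ls.drop i) hpre [] tables kept
        rw [List.append_nil] at h0
        rw [h0]
        have hfix : (((PySem.List.enumerate ls).drop i).filter
            (fun q => !(List.any [] (fun p : Nat × Nat =>
              decide ((p.1 : Int) ≤ q.1 ∧ q.1 ≤ (p.2 : Int)))))) =
            (PySem.List.enumerate ls).drop i :=
          List.filter_eq_self.mpr (fun a _ => by simp)
        rw [hfix]
        have hmap : ((PySem.List.enumerate ls).drop i).map (·.2) = ls.drop i := by
          rw [List.map_drop, PySem.List.map_snd_enumerate]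
        rw [hmap]
        simp [pvALoop]
      | some s =>
        have h1 : i ≤ s := pvFindTag_ge _ "<table" i hs
        have h2 : s < ls.length := hlen ▸ pvFindTag_lt _ "<table" i hs
        have hstart : PySem.Str.isIn "<table" (PySem.Str.lower ls[s]) = true := by
          have := pvFindTag_hit _ "<table" i hs (by omega)
          rwa [List.getElem_map] at this
        have hsmem : ls[s] ∈ ls := List.getElem_mem h2
        have hrs : pvRstripNl ls[s] = ls[s] := pvRstripNl_of_no_nl _ (hnl _ hsmem)
        -- the kept prefix before the table opens
        have hpre : ∀ l ∈ (ls.drop i).take (s - i), '\n' ∉ l.toList ∧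
            PySem.Str.isIn "<table" (PySem.Str.lower l) = false := by
          intro l hl
          obtain ⟨k, hk, hik, hks, rfl⟩ := pv_mem_take_drop ls i (s - i) l hl
          refine ⟨hnl _ (List.getElem_mem hk), ?_⟩
          have := pvFindTag_min _ "<table" i hs k hik (by omega) (by omega)
          rwa [List.getElem_map] at this
        have hdec := pv_drop_decomp ls i s h1
        rw [hdec, pvS1 _ hpre (ls.drop s) tables kept,
          List.drop_eq_getElem_cons h2]
        -- enumerate-side decomposition at s
        have hEdec := pv_drop_decomp (PySem.List.enumerate ls) i s h1
        -- the prefix of kept enumerated lines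
        have hEpre : (((PySem.List.enumerate ls).drop i).take (s - i)).map (·.2) =
            (ls.drop i).take (s - i) := by
          rw [List.map_take, List.map_drop, PySem.List.map_snd_enumerate]
        cases ht0 : pvFindTag (ls.map PySem.Str.lower) "</table>" s with
        | some t =>
          have h3 : s ≤ t := pvFindTag_ge _ "</table>" s ht0
          have h4 : t < ls.length := hlen ▸ pvFindTag_lt _ "</table>" s ht0
          have hendt : PySem.Str.isIn "</table>" (PySem.Str.lower ls[t]) = true := by
            have := pvFindTag_hit _ "</table>" s ht0 (by omega)
            rwa [List.getElem_map] at this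
          have hmid : ∀ j, s ≤ j → j < t → ∀ (hj : j < ls.length),
              PySem.Str.isIn "</table>" (PySem.Str.lower ls[j]) = false := by
            intro j hsj hjt hj
            have := pvFindTag_min _ "</table>" s ht0 j hsj hjt (by omega)
            rwa [List.getElem_map] at this
          rw [pvSpans_cons _ _ i s t hi hs (by rw [ht0])]
          -- span bounds for the remaining spans
          have hbnd := pvSpans_bounds (ls.map PySem.Str.lower) ls.length hlen
            ls.length (t + 1) (by omega)
          -- the table buffer equals the slice
          have hslice : PySem.List.slice ls (some (s : Int)) (some ((t : Int) + 1)) =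
              ls[s] :: ((ls.drop (s + 1)).take (t - (s + 1)) ++
                (if t = s then [] else [ls[t]])) := by
            have hc : ((t : Int) + 1) = ((t + 1 : Nat) : Int) := by push_cast; ring
            rw [hc, PySem.List.slice_natCast]
            by_cases hts : t = s
            · subst hts
              have he1 : t + 1 - t = 1 := by omega
              have he2 : t - (t + 1) = 0 := by omega
              rw [if_pos rfl, he1, he2]
              simp only [List.take_zero, List.append_nil]
              rw [List.drop_eq_getElem_cons h2, List.take_succ_cons, List.take_zero]
            · rw [if_neg hts, List.drop_eq_getElem_cons h2]
              have h5 : t + 1 - s = (t - (s + 1)) + 1 + 1 := by omega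
              rw [h5, List.take_succ_cons]
              have hdec2 := pv_drop_decomp ls (s + 1) t (by omega)
              have hlm : ((ls.drop (s + 1)).take (t - (s + 1))).length = t - (s + 1) := by
                rw [List.length_take, List.length_drop]
                omega
              conv_lhs => rw [hdec2]
              rw [List.take_append, List.take_of_length_le (by rw [hlm]; omega)]
              have h6 : t - (s + 1) + 1 - ((ls.drop (s + 1)).take (t - (s + 1))).length = 1 := by
                rw [hlm]; omega
              rw [h6, List.drop_eq_getElem_cons h4, List.take_succ_cons, List.take_zero]
          -- split the enumerated lines at s and t+1
          have hEdec2 := pv_drop_decomp (PySem.List.enumerate ls) s (t + 1) (by omega)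
          -- the filter over the enumerated lines, span by span
          have hfi : ((PySem.List.enumerate ls).drop i).filter
              (fun q => !(((s, t) :: pvSpans (ls.map PySem.Str.lower) ls.length (t + 1)).any
                 (fun p => decide ((p.1 : Int) ≤ q.1 ∧ q.1 ≤ (p.2 : Int))))) =
              ((PySem.List.enumerate ls).drop i).take (s - i) ++
                ((PySem.List.enumerate ls).drop (t + 1)).filter
                  (fun q => !((pvSpans (ls.map PySem.Str.lower) ls.length (t + 1)).any
                     (fun p => decide ((p.1 : Int) ≤ q.1 ∧ q.1 ≤ (p.2 : Int))))) := by
            rw [hEdec, hEdec2, List.filter_append, List.filter_append]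
            have hA : (((PySem.List.enumerate ls).drop i).take (s - i)).filter
                (fun q => !(((s, t) :: pvSpans (ls.map PySem.Str.lower) ls.length (t + 1)).any
                   (fun p => decide ((p.1 : Int) ≤ q.1 ∧ q.1 ≤ (p.2 : Int))))) =
                ((PySem.List.enumerate ls).drop i).take (s - i) := by
              refine List.filter_eq_self.mpr ?_
              intro q hq
              obtain ⟨k, hk, hik, hks, rfl⟩ := pv_enum_mem_take_drop ls i (s - i) q hq
              have hks' : k < s := by omega
              simp only [Bool.not_eq_true', List.any_eq_false]
              intro p hp
              rcases List.mem_cons.mp hp with heq | hp'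
              · rw [heq]
                simp only [decide_eq_true_eq]
                omega
              · have := hbnd p hp'
                simp only [decide_eq_true_eq]
                omega
            have hB : (((PySem.List.enumerate ls).drop s).take (t + 1 - s)).filter
                (fun q => !(((s, t) :: pvSpans (ls.map PySem.Str.lower) ls.length (t + 1)).any
                   (fun p => decide ((p.1 : Int) ≤ q.1 ∧ q.1 ≤ (p.2 : Int))))) = [] := by
              refine List.filter_eq_nil_iff.mpr ?_
              intro q hq
              obtain ⟨k, hk, hsk, hkt, rfl⟩ := pv_enum_mem_take_drop ls s (t + 1 - s) q hq
              simp only [Bool.not_eq_true', Bool.not_eq_false, List.any_cons, Bool.or_eq_true,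
                decide_eq_true_eq]
              left
              dsimp only
              omega
            have hC : ((PySem.List.enumerate ls).drop (t + 1)).filter
                (fun q => !(((s, t) :: pvSpans (ls.map PySem.Str.lower) ls.length (t + 1)).any
                   (fun p => decide ((p.1 : Int) ≤ q.1 ∧ q.1 ≤ (p.2 : Int))))) =
                ((PySem.List.enumerate ls).drop (t + 1)).filter
                  (fun q => !((pvSpans (ls.map PySem.Str.lower) ls.length (t + 1)).any
                     (fun p => decide ((p.1 : Int) ≤ q.1 ∧ q.1 ≤ (p.2 : Int))))) := by
              refine List.filter_congr ?_
              intro q hq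
              obtain ⟨k, hk, htk, rfl⟩ := pv_enum_mem_drop ls (t + 1) q hq
              have hh : decide ((s : Int) ≤ ((k : Nat) : Int) ∧ ((k : Nat) : Int) ≤ (t : Int)) = false := by
                simp only [decide_eq_false_iff_not, not_and]
                intro ha
                omega
              simp only [List.any_cons, hh, Bool.false_or]
            rw [hA, hB, hC, List.nil_append]
            congr 1
            exact (List.take_left'
              (by rw [List.length_take, List.length_drop, hElen]; omega)).symm
          by_cases hts : t = s
          · -- single-line table: the opening line also closes it
            have hsend : PySem.Str.isIn "</table>" (PySem.Str.lower ls[s]) = true := by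
              have h := hendt
              simp only [hts] at h
              exact h
            simp only [pvALoop, hrs, Bool.not_false, Bool.true_and, hstart, if_true, hsend]
            rw [show s + 1 = t + 1 by omega]
            rw [ihm (t + 1) (tables ++ [PySem.Str.join "\n" [ls[s]]])
              (kept ++ (ls.drop i).take (s - i)) (by omega)]
            have hbufeq : PySem.List.slice ls (some (s : Int)) (some ((t : Int) + 1)) =
                [ls[s]] := by
              rw [hslice, if_pos hts, hts]
              simp
            rw [List.map_cons]
            dsimp only
            rw [hbufeq, hfi, List.map_append, hEpre]
            simp [List.append_assoc]
          · -- multi-line table: buffer until the closing line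
            have hsend : PySem.Str.isIn "</table>" (PySem.Str.lower ls[s]) = false :=
              hmid s (le_refl s) (by omega) h2
            simp only [pvALoop, hrs, Bool.not_false, Bool.true_and, hstart, if_true, hsend,
              Bool.false_eq_true, if_false]
            have hmid' : ∀ l ∈ (ls.drop (s + 1)).take (t - (s + 1)), '\n' ∉ l.toList ∧
                PySem.Str.isIn "</table>" (PySem.Str.lower l) = false := by
              intro l hl
              obtain ⟨k, hk, hsk, hkt, rfl⟩ := pv_mem_take_drop ls (s + 1) (t - (s + 1)) l hl
              exact ⟨hnl _ (List.getElem_mem hk), hmid k (by omega) (by omega) hk⟩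
            have hdec2 := pv_drop_decomp ls (s + 1) t (by omega)
            rw [hdec2, List.drop_eq_getElem_cons h4,
              pvS2 _ hmid' ls[t] (hnl _ (List.getElem_mem h4)) hendt (ls.drop (t + 1))
                tables (kept ++ (ls.drop i).take (s - i)) [ls[s]],
              ihm (t + 1)
                (tables ++ [PySem.Str.join "\n"
                  ([ls[s]] ++ (ls.drop (s + 1)).take (t - (s + 1)) ++ [ls[t]])])
                (kept ++ (ls.drop i).take (s - i)) (by omega)]
            have hbufeq : PySem.List.slice ls (some (s : Int)) (some ((t : Int) + 1)) =
                [ls[s]] ++ (ls.drop (s + 1)).take (t - (s + 1)) ++ [ls[t]] := by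
              rw [hslice, if_neg hts]
              simp
            rw [List.map_cons]
            dsimp only
            rw [hbufeq, hfi, List.map_append, hEpre]
            simp [List.append_assoc]
        | none =>
          -- truncated table: everything from s on is buffered and flushed at the end
          have hnoend : ∀ j, s ≤ j → ∀ (hj : j < ls.length),
              PySem.Str.isIn "</table>" (PySem.Str.lower ls[j]) = false := by
            intro j hsj hj
            have := pvFindTag_none _ "</table>" s ht0 j hsj (by omega)
            rwa [List.getElem_map] at this
          rw [pvSpans_cons _ _ i s (ls.length - 1) hi hs (by rw [ht0]),
            pvSpans_stop _ _ _ (by omega)]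
          have hsend : PySem.Str.isIn "</table>" (PySem.Str.lower ls[s]) = false :=
            hnoend s (le_refl s) h2
          simp only [pvALoop, hrs, Bool.not_false, Bool.true_and, hstart, if_true, hsend,
            Bool.false_eq_true, if_false]
          have hmid' : ∀ l ∈ ls.drop (s + 1), '\n' ∉ l.toList ∧
              PySem.Str.isIn "</table>" (PySem.Str.lower l) = false := by
            intro l hl
            obtain ⟨k, hk, hsk, rfl⟩ := pv_mem_drop ls (s + 1) l hl
            exact ⟨hnl _ (List.getElem_mem hk), hnoend k (by omega) hk⟩
          rw [pvS3 (ls.drop (s + 1)) hmid' tables (kept ++ (ls.drop i).take (s - i))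
            [ls[s]] (by simp)]
          -- the single (truncated) table equals the tail slice
          have hslice : PySem.List.slice ls (some (s : Int))
              (some (((ls.length - 1 : Nat) : Int) + 1)) = ls[s] :: ls.drop (s + 1) := by
            have hc : ((ls.length - 1 : Nat) : Int) + 1 = ((ls.length : Nat) : Int) := by
              omega
            rw [hc, PySem.List.slice_natCast,
              List.take_of_length_le (by rw [List.length_drop]),
              List.drop_eq_getElem_cons h2]
          -- the filter keeps exactly the prefix before s
          have hfi : ((PySem.List.enumerate ls).drop i).filter
              (fun q => !(((s, ls.length - 1) :: ([] : List (Nat × Nat))).any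
                 (fun p => decide ((p.1 : Int) ≤ q.1 ∧ q.1 ≤ (p.2 : Int))))) =
              ((PySem.List.enumerate ls).drop i).take (s - i) := by
            rw [hEdec, List.filter_append]
            have hA : (((PySem.List.enumerate ls).drop i).take (s - i)).filter
                (fun q => !(((s, ls.length - 1) :: ([] : List (Nat × Nat))).any
                   (fun p => decide ((p.1 : Int) ≤ q.1 ∧ q.1 ≤ (p.2 : Int))))) =
                ((PySem.List.enumerate ls).drop i).take (s - i) := by
              refine List.filter_eq_self.mpr ?_
              intro q hq
              obtain ⟨k, hk, hik, hks, rfl⟩ := pv_enum_mem_take_drop ls i (s - i) q hq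
              have hks' : k < s := by omega
              simp only [Bool.not_eq_true', List.any_eq_false]
              intro p hp
              rcases List.mem_cons.mp hp with heq | hp'
              · rw [heq]
                simp only [decide_eq_true_eq]
                omega
              · simp at hp'
            have hB : ((PySem.List.enumerate ls).drop s).filter
                (fun q => !(((s, ls.length - 1) :: ([] : List (Nat × Nat))).any
                   (fun p => decide ((p.1 : Int) ≤ q.1 ∧ q.1 ≤ (p.2 : Int))))) = [] := by
              refine List.filter_eq_nil_iff.mpr ?_
              intro q hq
              obtain ⟨k, hk, hsk, rfl⟩ := pv_enum_mem_drop ls s q hq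
              simp only [Bool.not_eq_true', Bool.not_eq_false, List.any_cons, List.any_nil,
                Bool.or_false, decide_eq_true_eq]
              omega
            rw [hA, hB, List.append_nil]
            exact (List.take_left'
              (by rw [List.length_take, List.length_drop, hElen]; omega)).symm
          rw [hfi, hEpre, List.map_cons, List.map_nil]
          dsimp only
          rw [hslice]
          simp
    · exact base i tables kept (by omega)

-- ===== VERDICT (by name: the statement is the Claim_ definition above) =====
theorem extract_html_tables_py_spec : Claim_equal_extract_html_tables_py := by
  intro text _
  unfold Spec_extract_html_tables_py extract_html_tables_py extract_html_tables_py_alt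
  have h := pv_main (PySem.Str.splitlines (if text == "" then "" else text))
    (pv_splitlines_no_nl _) (PySem.Str.splitlines (if text == "" then "" else text)).length
    0 [] [] (by omega)
  simp only [List.drop_zero, List.nil_append] at h
  exact h
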